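-- pv_equiv track=rewrite | github.com/AshutoshMishraIITKGP/kdsh-2.0-track-a | src/final_decision.py | extract_character_spatiotemporal_info
-- ===== SOURCE A (Python) =====
-- from typing import List, Dict
--
-- def extract_character_spatiotemporal_info(evidence_chunks: List[Dict[str, str]]) -> Dict[str, Dict]:
--     """Extract basic location/time info for characters from evidence."""
--     character_info = {}
--
--     for chunk in evidence_chunks:
--         text = chunk.get('text', '').lower()
--
--         # Extract character mentions with location/time context
--         characters = ['faria', 'villefort', 'ayrton', 'kai-koumou', 'thalcave', 'noirtier', 'paganel']
--
--         for char in characters: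
--             if char in text:
--                 if char not in character_info:
--                     character_info[char] = {'locations': set(), 'time_periods': set(), 'status': set()}
--
--                 # Location indicators
--                 if any(loc in text for loc in ['prison', 'château d\'if', 'marseilles']):
--                     character_info[char]['locations'].add('prison')
--                 if any(loc in text for loc in ['paris', 'france']):
--                     character_info[char]['locations'].add('france')
--                 if any(loc in text for loc in ['ship', 'sea', 'voyage']):
--                     character_info[char]['locations'].add('sea')
--                 if any(loc in text for loc in ['new zealand', 'island']):
--                     character_info[char]['locations'].add('new_zealand')
--
--                 # Time period indicators
--                 if any(period in text for period in ['revolution', '1793', '1794']):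
--                     character_info[char]['time_periods'].add('revolution')
--                 if any(period in text for period in ['1815', 'napoleon', 'hundred days']):
--                     character_info[char]['time_periods'].add('1815')
--                 if any(period in text for period in ['1838', '1839', '1840']):
--                     character_info[char]['time_periods'].add('1838-1840')
--
--                 # Status indicators
--                 if any(status in text for status in ['imprisoned', 'prison', 'captive']):
--                     character_info[char]['status'].add('imprisoned')
--                 if any(status in text for status in ['dead', 'died', 'death']):
--                     character_info[char]['status'].add('dead')
--                 if any(status in text for status in ['exile', 'exiled']):
--                     character_info[char]['status'].add('exiled')
--
--     return character_info
-- ===== SOURCE B (Python) =====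
-- from typing import List, Dict
--
-- # Keyword rules: (field, tag, keywords).
-- RULES = [
--     ('locations', 'prison', ['prison', "château d'if", 'marseilles']),
--     ('locations', 'france', ['paris', 'france']),
--     ('locations', 'sea', ['ship', 'sea', 'voyage']),
--     ('locations', 'new_zealand', ['new zealand', 'island']),
--     ('time_periods', 'revolution', ['revolution', '1793', '1794']),
--     ('time_periods', '1815', ['1815', 'napoleon', 'hundred days']),
--     ('time_periods', '1838-1840', ['1838', '1839', '1840']),
--     ('status', 'imprisoned', ['imprisoned', 'prison', 'captive']),
--     ('status', 'dead', ['dead', 'died', 'death']),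
--     ('status', 'exiled', ['exile', 'exiled']),
-- ]
--
-- CHARACTERS = ['faria', 'villefort', 'ayrton', 'kai-koumou', 'thalcave', 'noirtier', 'paganel']
--
--
-- def extract_character_spatiotemporal_info(evidence_chunks: List[Dict[str, str]]) -> Dict[str, Dict]:
--     """Extract basic location/time info for characters from evidence.
--
--     Character-major, staged: lower all texts once, tag each text with its
--     (field, tag) profile, fix the characters' first-mention order, then build
--     each character's record by aggregating over all texts mentioning it.
--     """
--     texts = [chunk.get('text', '').lower() for chunk in evidence_chunks]
--     profiles = [[(field, tag) for field, tag, kws in RULES if any(k in t for k in kws)]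
--                 for t in texts]
--
--     order = []
--     for t in texts:
--         for char in CHARACTERS:
--             if char in t and char not in order:
--                 order.append(char)
--
--     result = {}
--     for char in order:
--         info = {'locations': set(), 'time_periods': set(), 'status': set()}
--         for t, prof in zip(texts, profiles):
--             if char in t:
--                 for field, tag in prof:
--                     info[field].add(tag)
--         result[char] = info
--     return result
-- ===== Notes on version B (the rewrite author's own statement) =====
-- stated objective: alternative
-- what changed: B transposes A's single incremental chunk-major pass (mutating a growing dict per chunk and per character) into staged character-major passes: lower all texts once, compute each text's (field,tag) profile, determine the characters' first-mention order, then build each character's record in one aggregation over all texts mentioning it.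
import Mathlib
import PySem

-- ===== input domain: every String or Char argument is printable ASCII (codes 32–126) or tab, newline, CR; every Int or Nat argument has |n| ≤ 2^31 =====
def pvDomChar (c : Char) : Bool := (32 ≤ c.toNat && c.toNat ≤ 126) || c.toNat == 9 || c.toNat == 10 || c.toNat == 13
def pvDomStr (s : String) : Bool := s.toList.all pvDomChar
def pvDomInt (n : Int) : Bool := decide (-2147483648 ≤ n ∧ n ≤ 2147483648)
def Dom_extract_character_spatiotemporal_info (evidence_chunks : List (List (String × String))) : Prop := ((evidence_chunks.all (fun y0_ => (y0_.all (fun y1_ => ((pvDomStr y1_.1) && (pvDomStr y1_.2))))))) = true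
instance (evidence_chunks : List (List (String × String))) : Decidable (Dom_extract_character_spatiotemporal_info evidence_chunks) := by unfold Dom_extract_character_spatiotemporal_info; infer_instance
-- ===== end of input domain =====

-- B transposes A's incremental chunk-major pass into staged character-major passes
-- (texts, per-text profiles, first-mention order, per-character aggregation); same
-- return value (objective: alternative).

-- ===== PORT A =====
-- character_info[char][field].add(tag)  (both keys always present when this runs)
def pvAddA (ci : PySem.Dict String (PySem.Dict String (PySem.Set String)))
    (char field tag : String) : PySem.Dict String (PySem.Dict String (PySem.Set String)) :=
  PySem.Dict.modify ci char PySem.Dict.empty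
    (fun inner => PySem.Dict.modify inner field PySem.Set.empty (fun s => PySem.Set.add s tag))

-- the body of A's inner 'for char in characters' loop
def pvCharStepA (text : String) (ci : PySem.Dict String (PySem.Dict String (PySem.Set String)))
    (char : String) : PySem.Dict String (PySem.Dict String (PySem.Set String)) :=
  if PySem.Str.isIn char text then
    let ci := if ci.contains char then ci else
      ci.insert char (PySem.Dict.mk [("locations", PySem.Set.empty), ("time_periods", PySem.Set.empty), ("status", PySem.Set.empty)])
    -- Location indicators
    let ci := if ["prison", "château d'if", "marseilles"].any (fun l => PySem.Str.isIn l text) then pvAddA ci char "locations" "prison" else ci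
    let ci := if ["paris", "france"].any (fun l => PySem.Str.isIn l text) then pvAddA ci char "locations" "france" else ci
    let ci := if ["ship", "sea", "voyage"].any (fun l => PySem.Str.isIn l text) then pvAddA ci char "locations" "sea" else ci
    let ci := if ["new zealand", "island"].any (fun l => PySem.Str.isIn l text) then pvAddA ci char "locations" "new_zealand" else ci
    -- Time period indicators
    let ci := if ["revolution", "1793", "1794"].any (fun l => PySem.Str.isIn l text) then pvAddA ci char "time_periods" "revolution" else ci
    let ci := if ["1815", "napoleon", "hundred days"].any (fun l => PySem.Str.isIn l text) then pvAddA ci char "time_periods" "1815" else ci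
    let ci := if ["1838", "1839", "1840"].any (fun l => PySem.Str.isIn l text) then pvAddA ci char "time_periods" "1838-1840" else ci
    -- Status indicators
    let ci := if ["imprisoned", "prison", "captive"].any (fun l => PySem.Str.isIn l text) then pvAddA ci char "status" "imprisoned" else ci
    let ci := if ["dead", "died", "death"].any (fun l => PySem.Str.isIn l text) then pvAddA ci char "status" "dead" else ci
    let ci := if ["exile", "exiled"].any (fun l => PySem.Str.isIn l text) then pvAddA ci char "status" "exiled" else ci
    ci
  else ci

-- the body of A's 'for chunk in evidence_chunks' loop
def pvStepA (character_info : PySem.Dict String (PySem.Dict String (PySem.Set String)))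
    (chunk : List (String × String)) : PySem.Dict String (PySem.Dict String (PySem.Set String)) :=
  let text := PySem.Str.lower ((PySem.Dict.mk chunk).getD "text" "")
  let characters := ["faria", "villefort", "ayrton", "kai-koumou", "thalcave", "noirtier", "paganel"]
  characters.foldl (pvCharStepA text) character_info

def extract_character_spatiotemporal_info (evidence_chunks : List (List (String × String))) : List (String × List (String × List String)) :=
  ((evidence_chunks.foldl pvStepA PySem.Dict.empty).items.map (fun p => (p.1, p.2.items)))

-- ===== PORT B =====
def pvRULES : List (String × String × List String) :=
  [("locations", "prison", ["prison", "château d'if", "marseilles"]),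
   ("locations", "france", ["paris", "france"]),
   ("locations", "sea", ["ship", "sea", "voyage"]),
   ("locations", "new_zealand", ["new zealand", "island"]),
   ("time_periods", "revolution", ["revolution", "1793", "1794"]),
   ("time_periods", "1815", ["1815", "napoleon", "hundred days"]),
   ("time_periods", "1838-1840", ["1838", "1839", "1840"]),
   ("status", "imprisoned", ["imprisoned", "prison", "captive"]),
   ("status", "dead", ["dead", "died", "death"]),
   ("status", "exiled", ["exile", "exiled"])]

def pvCHARACTERS : List String :=
  ["faria", "villefort", "ayrton", "kai-koumou", "thalcave", "noirtier", "paganel"]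

-- chunk.get('text', '').lower()
def pvToText (chunk : List (String × String)) : String :=
  PySem.Str.lower ((PySem.Dict.mk chunk).getD "text" "")

-- [(field, tag) for field, tag, kws in RULES if any(k in t for k in kws)]
def pvProfile (t : String) : List (String × String) :=
  (pvRULES.filter (fun r => r.2.2.any (fun k => PySem.Str.isIn k t))).map (fun r => (r.1, r.2.1))

-- the body of B's 'for t in texts' order loop (the inner 'for char in CHARACTERS')
def pvOrderStep (ord : List String) (t : String) : List String :=
  pvCHARACTERS.foldl
    (fun ord ch => if PySem.Str.isIn ch t && !(ord.contains ch) then ord ++ [ch] else ord) ord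

def pvOrder (texts : List String) : List String :=
  texts.foldl pvOrderStep []

-- {'locations': set(), 'time_periods': set(), 'status': set()}
def pvInit : PySem.Dict String (PySem.Set String) :=
  PySem.Dict.mk [("locations", PySem.Set.empty), ("time_periods", PySem.Set.empty), ("status", PySem.Set.empty)]

-- for field, tag in prof: info[field].add(tag)
def pvAddProf (info : PySem.Dict String (PySem.Set String)) (prof : List (String × String)) :
    PySem.Dict String (PySem.Set String) :=
  prof.foldl (fun info ft => PySem.Dict.modify info ft.1 PySem.Set.empty (fun s => PySem.Set.add s ft.2)) info

-- B's per-character aggregation loop over zip(texts, profiles)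
def pvInfoFor (texts : List String) (profiles : List (List (String × String))) (ch : String) :
    PySem.Dict String (PySem.Set String) :=
  (texts.zip profiles).foldl
    (fun info tp => if PySem.Str.isIn ch tp.1 then pvAddProf info tp.2 else info) pvInit

def extract_character_spatiotemporal_info_alt (evidence_chunks : List (List (String × String))) : List (String × List (String × List String)) :=
  let texts := evidence_chunks.map pvToText
  let profiles := texts.map pvProfile
  let ord := pvOrder texts
  ((ord.foldl (fun d ch => d.insert ch (pvInfoFor texts profiles ch)) PySem.Dict.empty).items.map
    (fun p => (p.1, p.2.items)))

-- ===== PRECONDITION & SPEC =====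
def Spec_extract_character_spatiotemporal_info (evidence_chunks : List (List (String × String))) (out : List (String × List (String × List String))) : Prop := out = extract_character_spatiotemporal_info_alt evidence_chunks
instance (evidence_chunks : List (List (String × String))) (out : List (String × List (String × List String))) : Decidable (Spec_extract_character_spatiotemporal_info evidence_chunks out) := by unfold Spec_extract_character_spatiotemporal_info; infer_instance

-- ===== CLAIM =====
def Claim_equal_extract_character_spatiotemporal_info : Prop := ∀ (evidence_chunks : List (List (String × String))), Dom_extract_character_spatiotemporal_info evidence_chunks → Spec_extract_character_spatiotemporal_info evidence_chunks (extract_character_spatiotemporal_info evidence_chunks)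

-- ===== LEMMAS AND PROOFS =====
-- Proof-only abbreviations
def pvStepAT (d : PySem.Dict String (PySem.Dict String (PySem.Set String))) (t : String) :
    PySem.Dict String (PySem.Dict String (PySem.Set String)) :=
  pvCHARACTERS.foldl (pvCharStepA t) d

-- A's chain of conditional adds at key ch, profile-driven
def pvAddProfAt (d : PySem.Dict String (PySem.Dict String (PySem.Set String))) (ch : String)
    (prof : List (String × String)) : PySem.Dict String (PySem.Dict String (PySem.Set String)) :=
  prof.foldl (fun d ft => PySem.Dict.modify d ch PySem.Dict.empty
    (fun inner => PySem.Dict.modify inner ft.1 PySem.Set.empty (fun s => PySem.Set.add s ft.2))) d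

def pvInfoF (texts : List String) (ch : String) : PySem.Dict String (PySem.Set String) :=
  pvInfoFor texts (texts.map pvProfile) ch

def pvBuild (texts : List String) : PySem.Dict String (PySem.Dict String (PySem.Set String)) :=
  (pvOrder texts).foldl (fun d ch => d.insert ch (pvInfoF texts ch)) PySem.Dict.empty

theorem pvStepA_eq (d : PySem.Dict String (PySem.Dict String (PySem.Set String)))
    (chunk : List (String × String)) : pvStepA d chunk = pvStepAT d (pvToText chunk) := rfl

-- L0: A's if-chain at ch is the profile fold at ch
theorem pvCharStepA_eq (t : String) (d : PySem.Dict String (PySem.Dict String (PySem.Set String)))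
    (ch : String) :
    pvCharStepA t d ch =
      if PySem.Str.isIn ch t then
        pvAddProfAt (if d.contains ch then d else d.insert ch pvInit) ch (pvProfile t)
      else d := by
  unfold pvCharStepA pvAddProfAt pvAddA pvProfile pvInit
  by_cases h : PySem.Str.isIn ch t = true
  · simp only [h, if_true]
    generalize (if d.contains ch then d else
      d.insert ch (PySem.Dict.mk [("locations", PySem.Set.empty), ("time_periods", PySem.Set.empty), ("status", PySem.Set.empty)])) = d'
    simp only [pvRULES, List.foldl_map, List.foldl_filter, List.foldl]
  · simp only [h, Bool.false_eq_true, if_false]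

-- pvAddProfAt keeps the key set when ch is present
theorem keys_pvAddProfAt (prof : List (String × String)) :
    ∀ d : PySem.Dict String (PySem.Dict String (PySem.Set String)), ch ∈ d.keys →
      (pvAddProfAt d ch prof).keys = d.keys := by
  induction prof with
  | nil => intro d _; rfl
  | cons ft rest ih =>
    intro d hch
    unfold pvAddProfAt
    rw [List.foldl_cons]
    have hc : d.contains ch = true := (PySem.Dict.contains_iff_mem_keys d ch).mpr hch
    have hkeys : (PySem.Dict.modify d ch PySem.Dict.empty
        (fun inner => PySem.Dict.modify inner ft.1 PySem.Set.empty (fun s => PySem.Set.add s ft.2))).keys = d.keys := by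
      rw [PySem.Dict.keys_modify, PySem.Dict.keys_insert_of_contains _ _ hc]
    have := ih (PySem.Dict.modify d ch PySem.Dict.empty
        (fun inner => PySem.Dict.modify inner ft.1 PySem.Set.empty (fun s => PySem.Set.add s ft.2)))
      (by rw [hkeys]; exact hch)
    unfold pvAddProfAt at this
    rw [this, hkeys]

-- L2b: its value at ch is B's pvAddProf of the old value
theorem getD_pvAddProfAt_self (prof : List (String × String)) :
    ∀ d : PySem.Dict String (PySem.Dict String (PySem.Set String)),
      (pvAddProfAt d ch prof).getD ch PySem.Dict.empty =
        pvAddProf (d.getD ch PySem.Dict.empty) prof := by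
  induction prof with
  | nil => intro d; rfl
  | cons ft rest ih =>
    intro d
    unfold pvAddProfAt pvAddProf
    rw [List.foldl_cons, List.foldl_cons]
    have := ih (PySem.Dict.modify d ch PySem.Dict.empty
        (fun inner => PySem.Dict.modify inner ft.1 PySem.Set.empty (fun s => PySem.Set.add s ft.2)))
    unfold pvAddProfAt pvAddProf at this
    rw [this, PySem.Dict.getD_modify_self]

-- L2c: and it leaves every other key alone
theorem getD_pvAddProfAt_ne (prof : List (String × String)) (hx : x ≠ ch) :
    ∀ d : PySem.Dict String (PySem.Dict String (PySem.Set String)),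
      (pvAddProfAt d ch prof).getD x PySem.Dict.empty = d.getD x PySem.Dict.empty := by
  induction prof with
  | nil => intro d; rfl
  | cons ft rest ih =>
    intro d
    unfold pvAddProfAt
    rw [List.foldl_cons]
    have := ih (PySem.Dict.modify d ch PySem.Dict.empty
        (fun inner => PySem.Dict.modify inner ft.1 PySem.Set.empty (fun s => PySem.Set.add s ft.2)))
    unfold pvAddProfAt at this
    rw [this, PySem.Dict.getD_modify_of_ne _ _ _ hx]

-- L1: effect of one char step on the key list
theorem keys_pvCharStepA (t : String) (d : PySem.Dict String (PySem.Dict String (PySem.Set String)))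
    (ch : String) :
    (pvCharStepA t d ch).keys =
      if PySem.Str.isIn ch t && !(d.keys.contains ch) then d.keys ++ [ch] else d.keys := by
  rw [pvCharStepA_eq]
  by_cases h : PySem.Str.isIn ch t = true
  · rw [if_pos h, h, Bool.true_and]
    by_cases hm : ch ∈ d.keys
    · have hc : d.contains ch = true := (PySem.Dict.contains_iff_mem_keys d ch).mpr hm
      rw [if_pos hc, List.contains_iff_mem.mpr hm, Bool.not_true,
        if_neg (by decide : ¬ (false = true))]
      exact keys_pvAddProfAt _ _ hm
    · have hc : d.contains ch = false := by
        by_contra hcc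
        exact hm ((PySem.Dict.contains_iff_mem_keys d ch).mp (by revert hcc; cases d.contains ch <;> simp))
      have hl : d.keys.contains ch = false := by
        by_contra hcc
        exact hm (List.contains_iff_mem.mp (by revert hcc; cases d.keys.contains ch <;> simp))
      rw [if_neg (by simp [hc]), hl, Bool.not_false, if_pos rfl]
      have hk : (d.insert ch pvInit).keys = d.keys ++ [ch] :=
        PySem.Dict.keys_insert_of_not_contains d pvInit hc
      rw [keys_pvAddProfAt _ _ (by rw [hk]; exact List.mem_append_right _ (List.mem_singleton.mpr rfl)), hk]
  · have hf : PySem.Str.isIn ch t = false := by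
      cases hi : PySem.Str.isIn ch t
      · rfl
      · exact absurd hi h
    rw [if_neg h, hf, Bool.false_and, if_neg (by decide : ¬ (false = true))]

-- L2: value of one char step at its own key
theorem getD_pvCharStepA_self (t : String) (d : PySem.Dict String (PySem.Dict String (PySem.Set String)))
    (ch : String) :
    (pvCharStepA t d ch).getD ch PySem.Dict.empty =
      if PySem.Str.isIn ch t then
        pvAddProf (if ch ∈ d.keys then d.getD ch PySem.Dict.empty else pvInit) (pvProfile t)
      else d.getD ch PySem.Dict.empty := by
  rw [pvCharStepA_eq]
  by_cases h : PySem.Str.isIn ch t = true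
  · simp only [h, if_true]
    by_cases hm : ch ∈ d.keys
    · have hc : d.contains ch = true := (PySem.Dict.contains_iff_mem_keys d ch).mpr hm
      rw [if_pos hc, getD_pvAddProfAt_self, if_pos hm]
    · have hc : d.contains ch = false := by
        by_contra hcc
        exact hm ((PySem.Dict.contains_iff_mem_keys d ch).mp (by revert hcc; cases d.contains ch <;> simp))
      rw [if_neg (by simp [hc]), getD_pvAddProfAt_self, if_neg hm, PySem.Dict.getD_insert_self]
  · rw [if_neg h, if_neg h]

-- and at any other key
theorem getD_pvCharStepA_ne (t : String) (d : PySem.Dict String (PySem.Dict String (PySem.Set String)))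
    (ch : String) (hx : x ≠ ch) :
    (pvCharStepA t d ch).getD x PySem.Dict.empty = d.getD x PySem.Dict.empty := by
  rw [pvCharStepA_eq]
  by_cases h : PySem.Str.isIn ch t = true
  · simp only [h, if_true]
    rw [getD_pvAddProfAt_ne _ hx]
    by_cases hc : d.contains ch = true
    · rw [if_pos hc]
    · rw [if_neg hc, PySem.Dict.getD_insert_of_ne _ _ _ hx]
  · rw [if_neg h]

-- L3a: the char loop transforms the key list exactly as B's order loop does
theorem keys_foldl_pvCharStepA (t : String) (cs : List String) :
    ∀ d : PySem.Dict String (PySem.Dict String (PySem.Set String)),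
      (cs.foldl (pvCharStepA t) d).keys =
        cs.foldl (fun ord ch => if PySem.Str.isIn ch t && !(ord.contains ch) then ord ++ [ch] else ord) d.keys := by
  induction cs with
  | nil => intro d; rfl
  | cons ch cs ih =>
    intro d
    rw [List.foldl_cons, List.foldl_cons, ih, keys_pvCharStepA]

-- L3b: keys not in the char list are untouched
theorem getD_foldl_pvCharStepA_not_mem (t : String) (cs : List String) :
    ∀ d : PySem.Dict String (PySem.Dict String (PySem.Set String)), x ∉ cs →
      (cs.foldl (pvCharStepA t) d).getD x PySem.Dict.empty = d.getD x PySem.Dict.empty := by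
  induction cs with
  | nil => intro d _; rfl
  | cons ch cs ih =>
    intro d hx
    rw [List.foldl_cons, ih _ (fun h => hx (List.mem_cons_of_mem _ h)),
      getD_pvCharStepA_ne t d ch (fun h => hx (h ▸ List.mem_cons_self))]

-- L3c: value of the whole char loop at a key of the char list
theorem getD_foldl_pvCharStepA_mem (t : String) (cs : List String) :
    ∀ d : PySem.Dict String (PySem.Dict String (PySem.Set String)), cs.Nodup → x ∈ cs →
      (cs.foldl (pvCharStepA t) d).getD x PySem.Dict.empty =
        if PySem.Str.isIn x t then
          pvAddProf (if x ∈ d.keys then d.getD x PySem.Dict.empty else pvInit) (pvProfile t)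
        else d.getD x PySem.Dict.empty := by
  induction cs with
  | nil => intro d _ hx; exact absurd hx (List.not_mem_nil)
  | cons ch cs ih =>
    intro d hnd hx
    rw [List.foldl_cons]
    rcases List.nodup_cons.mp hnd with ⟨hch, hnd'⟩
    by_cases hxc : x = ch
    · subst hxc
      rw [getD_foldl_pvCharStepA_not_mem t cs _ hch, getD_pvCharStepA_self]
    · have hx' : x ∈ cs := by
        rcases List.mem_cons.mp hx with h | h
        · exact absurd h hxc
        · exact h
      rw [ih _ hnd' hx', getD_pvCharStepA_ne t d ch hxc]
      have hmem : (x ∈ (pvCharStepA t d ch).keys) ↔ (x ∈ d.keys) := by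
        rw [keys_pvCharStepA]
        by_cases hc : (PySem.Str.isIn ch t && !(d.keys.contains ch)) = true
        · rw [if_pos hc]
          simp only [List.mem_append, List.mem_singleton]
          exact ⟨fun h => h.elim id (fun h => absurd h hxc), Or.inl⟩
        · rw [if_neg hc]
      by_cases hm : x ∈ d.keys
      · rw [if_pos hm, if_pos (hmem.mpr hm)]
      · rw [if_neg hm, if_neg (fun h => hm (hmem.mp h))]

-- order-loop membership, one text
theorem mem_foldl_orderstep (t : String) (cs : List String) (x : String) :
    ∀ ord : List String,
      (x ∈ cs.foldl (fun ord ch => if PySem.Str.isIn ch t && !(ord.contains ch) then ord ++ [ch] else ord) ord) ↔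
        x ∈ ord ∨ (x ∈ cs ∧ PySem.Str.isIn x t = true) := by
  induction cs with
  | nil => intro ord; simp
  | cons ch cs ih =>
    intro ord
    rw [List.foldl_cons, ih]
    by_cases hc : (PySem.Str.isIn ch t && !(ord.contains ch)) = true
    · rw [if_pos hc]
      have hin : PySem.Str.isIn ch t = true := by
        cases hi : PySem.Str.isIn ch t
        · rw [hi, Bool.false_and] at hc; exact absurd hc (by decide)
        · rfl
      simp only [List.mem_append, List.mem_cons, List.not_mem_nil, or_false]
      constructor
      · rintro (⟨h | h⟩ | ⟨h1, h2⟩)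
        · exact Or.inl h
        · exact Or.inr ⟨Or.inl h, h ▸ hin⟩
        · exact Or.inr ⟨Or.inr h1, h2⟩
      · rintro (h | ⟨(h1 | h1), h2⟩)
        · exact Or.inl (Or.inl h)
        · exact Or.inl (Or.inr h1)
        · exact Or.inr ⟨h1, h2⟩
    · rw [if_neg hc]
      simp only [List.mem_cons]
      constructor
      · rintro (h | ⟨h1, h2⟩)
        · exact Or.inl h
        · exact Or.inr ⟨Or.inr h1, h2⟩
      · rintro (h | ⟨(h1 | h1), h2⟩)
        · exact Or.inl h
        · subst h1
          by_cases hm : x ∈ ord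
          · exact Or.inl hm
          · exfalso
            apply hc
            rw [h2, Bool.true_and]
            cases hco : ord.contains x
            · rfl
            · exact absurd (List.contains_iff_mem.mp hco) hm
        · exact Or.inr ⟨h1, h2⟩

theorem mem_pvOrderStep (t : String) (ord : List String) (x : String) :
    x ∈ pvOrderStep ord t ↔ x ∈ ord ∨ (x ∈ pvCHARACTERS ∧ PySem.Str.isIn x t = true) :=
  mem_foldl_orderstep t pvCHARACTERS x ord

-- order-loop Nodup, one text
theorem nodup_foldl_orderstep (t : String) (cs : List String) :
    ∀ ord : List String, ord.Nodup →
      (cs.foldl (fun ord ch => if PySem.Str.isIn ch t && !(ord.contains ch) then ord ++ [ch] else ord) ord).Nodup := by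
  induction cs with
  | nil => intro ord h; exact h
  | cons ch cs ih =>
    intro ord hnd
    rw [List.foldl_cons]
    apply ih
    by_cases hc : (PySem.Str.isIn ch t && !(ord.contains ch)) = true
    · rw [if_pos hc]
      have hnc : ord.contains ch = false := by
        cases hco : ord.contains ch
        · rfl
        · rw [hco, Bool.not_true, Bool.and_false] at hc; exact absurd hc (by decide)
      have hm : ch ∉ ord := fun hmem => by
        rw [List.contains_iff_mem.mpr hmem] at hnc; exact absurd hnc (by decide)
      rw [← List.concat_eq_append]
      exact List.Nodup.concat hm hnd
    · rw [if_neg hc]; exact hnd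

theorem nodup_pvOrderStep (t : String) (ord : List String) (h : ord.Nodup) :
    (pvOrderStep ord t).Nodup :=
  nodup_foldl_orderstep t pvCHARACTERS ord h

-- O3: order membership over a text list
theorem mem_foldl_pvOrderStep (texts : List String) (x : String) :
    ∀ ord : List String,
      (x ∈ texts.foldl pvOrderStep ord) ↔
        x ∈ ord ∨ (x ∈ pvCHARACTERS ∧ ∃ t ∈ texts, PySem.Str.isIn x t = true) := by
  induction texts with
  | nil => intro ord; simp
  | cons t ts ih =>
    intro ord
    rw [List.foldl_cons, ih, mem_pvOrderStep]
    constructor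
    · rintro ((h | ⟨h1, h2⟩) | ⟨h1, t', ht', h2⟩)
      · exact Or.inl h
      · exact Or.inr ⟨h1, t, List.mem_cons_self, h2⟩
      · exact Or.inr ⟨h1, t', List.mem_cons_of_mem _ ht', h2⟩
    · rintro (h | ⟨h1, t', ht', h2⟩)
      · exact Or.inl (Or.inl h)
      · rcases List.mem_cons.mp ht' with h | h
        · exact Or.inl (Or.inr ⟨h1, h ▸ h2⟩)
        · exact Or.inr ⟨h1, t', h, h2⟩

theorem mem_pvOrder (texts : List String) (x : String) :
    x ∈ pvOrder texts ↔ x ∈ pvCHARACTERS ∧ ∃ t ∈ texts, PySem.Str.isIn x t = true := by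
  unfold pvOrder
  rw [mem_foldl_pvOrderStep]
  simp

theorem nodup_pvOrder (texts : List String) : (pvOrder texts).Nodup := by
  unfold pvOrder
  have : ∀ ord : List String, ord.Nodup → (texts.foldl pvOrderStep ord).Nodup := by
    induction texts with
    | nil => intro ord h; exact h
    | cons t ts ih => intro ord h; rw [List.foldl_cons]; exact ih _ (nodup_pvOrderStep t ord h)
  exact this [] List.nodup_nil

theorem pvOrder_append_singleton (texts : List String) (t : String) :
    pvOrder (texts ++ [t]) = pvOrderStep (pvOrder texts) t := by
  unfold pvOrder
  rw [List.foldl_append, List.foldl_cons, List.foldl_nil]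

-- build-dict lookups
theorem getD_foldl_insert (I : String → PySem.Dict String (PySem.Set String)) (ord : List String)
    (x : String) :
    ∀ d : PySem.Dict String (PySem.Dict String (PySem.Set String)),
      (ord.foldl (fun d ch => d.insert ch (I ch)) d).getD x PySem.Dict.empty =
        if x ∈ ord then I x else d.getD x PySem.Dict.empty := by
  induction ord with
  | nil => intro d; simp
  | cons ch rest ih =>
    intro d
    rw [List.foldl_cons, ih]
    by_cases hr : x ∈ rest
    · rw [if_pos hr, if_pos (List.mem_cons_of_mem _ hr)]
    · rw [if_neg hr]
      by_cases hx : x = ch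
      · subst hx
        rw [if_pos List.mem_cons_self, PySem.Dict.getD_insert_self]
      · rw [if_neg (by simp [hx, hr]), PySem.Dict.getD_insert_of_ne _ _ _ hx]

theorem keys_pvBuild (texts : List String) : (pvBuild texts).keys = pvOrder texts := by
  unfold pvBuild
  rw [PySem.Dict.keys_foldl_insert (f := fun _ ch => pvInfoF texts ch)]
  rw [PySem.Dict.keys_empty, PySem.Set.update_nil_left,
    PySem.Set.ofList_eq_self_of_nodup _ (nodup_pvOrder texts)]

theorem getD_pvBuild (texts : List String) (x : String) :
    (pvBuild texts).getD x PySem.Dict.empty =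
      if x ∈ pvOrder texts then pvInfoF texts x else PySem.Dict.empty := by
  unfold pvBuild
  rw [getD_foldl_insert]
  rw [PySem.Dict.getD_empty]

-- I1: snoc step of the per-character aggregation
theorem pvInfoF_append_singleton (texts : List String) (t : String) (ch : String) :
    pvInfoF (texts ++ [t]) ch =
      if PySem.Str.isIn ch t then pvAddProf (pvInfoF texts ch) (pvProfile t)
      else pvInfoF texts ch := by
  unfold pvInfoF pvInfoFor
  rw [List.map_append, List.zip_append (by simp), List.foldl_append]
  simp only [List.map_cons, List.map_nil, List.zip_cons_cons, List.zip_nil_right,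
    List.foldl_cons, List.foldl_nil]

-- I2: a character mentioned in no text keeps the empty record
theorem pvInfoF_of_not_mentioned (texts : List String) (ch : String)
    (h : ∀ t ∈ texts, ¬ PySem.Str.isIn ch t = true) : pvInfoF texts ch = pvInit := by
  unfold pvInfoF pvInfoFor
  have : ∀ l : List (String × List (String × String)), (∀ p ∈ l, p.1 ∈ texts) →
      (l.foldl (fun info tp => if PySem.Str.isIn ch tp.1 then pvAddProf info tp.2 else info) pvInit) = pvInit := by
    intro l
    induction l with
    | nil => intro _; rfl
    | cons p rest ih =>
      intro hl
      rw [List.foldl_cons, if_neg (h p.1 (hl p List.mem_cons_self))]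
      exact ih (fun q hq => hl q (List.mem_cons_of_mem _ hq))
  exact this _ (fun p hp => (List.of_mem_zip hp).1)

theorem pvCHARACTERS_nodup : pvCHARACTERS.Nodup := by decide

-- M: the snoc step — processing one more text on A's side updates B's built dict
theorem pvStepAT_pvBuild (texts : List String) (t : String) :
    pvStepAT (pvBuild texts) t = pvBuild (texts ++ [t]) := by
  have hkeysL : (pvStepAT (pvBuild texts) t).keys = pvOrder (texts ++ [t]) := by
    unfold pvStepAT
    rw [keys_foldl_pvCharStepA, keys_pvBuild, pvOrder_append_singleton]
    rfl
  have hkeysR : (pvBuild (texts ++ [t])).keys = pvOrder (texts ++ [t]) := keys_pvBuild _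
  have hndL : (pvStepAT (pvBuild texts) t).keys.Nodup := by
    rw [hkeysL]; exact nodup_pvOrder _
  have hndR : (pvBuild (texts ++ [t])).keys.Nodup := by
    rw [hkeysR]; exact nodup_pvOrder _
  apply PySem.Dict.ext
  rw [PySem.Dict.items_eq_map_keys _ hndL PySem.Dict.empty,
    PySem.Dict.items_eq_map_keys _ hndR PySem.Dict.empty, hkeysL, hkeysR]
  apply List.map_congr_left
  intro x hx
  have hgetR : (pvBuild (texts ++ [t])).getD x PySem.Dict.empty = pvInfoF (texts ++ [t]) x := by
    rw [getD_pvBuild, if_pos hx]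
  rw [hgetR]
  have hxC : x ∈ pvCHARACTERS := ((mem_pvOrder _ x).mp hx).1
  have hgetL : (pvStepAT (pvBuild texts) t).getD x PySem.Dict.empty =
      if PySem.Str.isIn x t then
        pvAddProf (if x ∈ (pvBuild texts).keys then (pvBuild texts).getD x PySem.Dict.empty else pvInit) (pvProfile t)
      else (pvBuild texts).getD x PySem.Dict.empty := by
    unfold pvStepAT
    exact getD_foldl_pvCharStepA_mem t pvCHARACTERS _ pvCHARACTERS_nodup hxC
  rw [hgetL, pvInfoF_append_singleton, keys_pvBuild, getD_pvBuild]
  by_cases hin : PySem.Str.isIn x t = true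
  · by_cases hm : x ∈ pvOrder texts
    · simp only [hin, hm, if_true]
    · have hno : ∀ t' ∈ texts, ¬ PySem.Str.isIn x t' = true := by
        intro t' ht' hcon
        exact hm ((mem_pvOrder texts x).mpr ⟨hxC, t', ht', hcon⟩)
      simp only [hin, hm, if_true, if_false,
        pvInfoF_of_not_mentioned texts x hno]
  · have hm : x ∈ pvOrder texts := by
      rcases (mem_pvOrder _ x).mp hx with ⟨_, t', ht', hmen⟩
      rcases List.mem_append.mp ht' with h | h
      · exact (mem_pvOrder texts x).mpr ⟨hxC, t', h, hmen⟩
      · rw [List.mem_singleton.mp h] at hmen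
        exact absurd hmen hin
    simp only [hin, hm, if_true]

-- the whole fold
theorem foldl_pvStepAT_eq_pvBuild (texts : List String) :
    texts.foldl pvStepAT PySem.Dict.empty = pvBuild texts := by
  induction texts using List.reverseRecOn with
  | nil => rfl
  | append_singleton ts t ih =>
    rw [List.foldl_append, List.foldl_cons, List.foldl_nil, ih, pvStepAT_pvBuild]

-- ===== VERDICT =====
theorem extract_character_spatiotemporal_info_spec : Claim_equal_extract_character_spatiotemporal_info := by
  intro chunks _
  unfold Spec_extract_character_spatiotemporal_info extract_character_spatiotemporal_info
    extract_character_spatiotemporal_info_alt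
  have hfun : pvStepA = fun d chunk => pvStepAT d (pvToText chunk) :=
    funext fun d => funext fun chunk => pvStepA_eq d chunk
  have h1 : chunks.foldl pvStepA PySem.Dict.empty =
      (chunks.map pvToText).foldl pvStepAT PySem.Dict.empty := by
    rw [List.foldl_map, ← hfun]
  rw [h1, foldl_pvStepAT_eq_pvBuild]
  rfl
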